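-- pv_equiv track=rewrite | github.com/spesmilo/electrum | electrum/slip39.py | _rs1024_polymod
-- ===== SOURCE A (Python) =====
-- from typing import Dict, Iterable, List, Optional, Set, Tuple
--
-- Indices = Tuple[int, ...]
--
-- def _rs1024_polymod(values: Indices) -> int:
--     GEN = (
--         0xE0E040,
--         0x1C1C080,
--         0x3838100,
--         0x7070200,
--         0xE0E0009,
--         0x1C0C2412,
--         0x38086C24,
--         0x3090FC48,
--         0x21B1F890,
--         0x3F3F120,
--     )
--     chk = 1
--     for v in values:
--         b = chk >> 20
--         chk = (chk & 0xFFFFF) << 10 ^ v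
--         for i in range(10):
--             chk ^= GEN[i] if ((b >> i) & 1) else 0
--     return chk
-- ===== SOURCE B (Python) =====
-- GEN = (
--     0xE0E040,
--     0x1C1C080,
--     0x3838100,
--     0x7070200,
--     0xE0E0009,
--     0x1C0C2412,
--     0x38086C24,
--     0x3090FC48,
--     0x21B1F890,
--     0x3F3F120,
-- )
--
-- # Precomputed 1024-entry table: _TABLE[x] = XOR of GEN[i] over all bits i set in x,
-- # built by doubling (each generator doubles the table).
-- _TABLE = [0]
-- for _g in GEN:
--     _TABLE += [_t ^ _g for _t in _TABLE]
--
--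
-- def _rs1024_polymod(values):
--     chk = 1
--     for v in values:
--         chk = ((chk & 0xFFFFF) << 10) ^ v ^ _TABLE[(chk >> 20) & 0x3FF]
--     return chk
-- ===== Notes on version B (the rewrite author's own statement) =====
-- stated objective: faster
-- what changed: Replaces A's inner 10-iteration loop (XOR of GEN[i] for each set bit of the 10 carry bits, recomputed every step) with a single lookup in a 1024-entry table precomputed once by doubling, so each input value costs one mask/shift/xor/lookup.
import Mathlib
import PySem

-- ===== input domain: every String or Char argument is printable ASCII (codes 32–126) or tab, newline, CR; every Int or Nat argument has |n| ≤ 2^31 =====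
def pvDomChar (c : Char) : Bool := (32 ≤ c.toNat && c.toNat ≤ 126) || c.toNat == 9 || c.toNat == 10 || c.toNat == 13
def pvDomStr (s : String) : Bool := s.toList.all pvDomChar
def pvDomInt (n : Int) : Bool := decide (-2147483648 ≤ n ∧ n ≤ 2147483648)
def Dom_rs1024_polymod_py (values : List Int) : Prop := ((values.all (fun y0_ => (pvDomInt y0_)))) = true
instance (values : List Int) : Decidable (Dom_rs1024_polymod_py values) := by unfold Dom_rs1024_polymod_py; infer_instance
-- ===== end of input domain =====

-- B replaces A's 10-iteration inner bit loop by a lookup in a precomputed 1024-entry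
-- XOR table indexed by the 10 carry bits (constant-factor change; same return value).

-- ===== PORT A =====
def pvGENA : List Int :=
  [0xE0E040, 0x1C1C080, 0x3838100, 0x7070200, 0xE0E0009,
   0x1C0C2412, 0x38086C24, 0x3090FC48, 0x21B1F890, 0x3F3F120]

def rs1024_polymod_py (values : List Int) : Int :=
  values.foldl (fun chk v =>
    let b := chk >>> (20 : Nat)
    let chk1 := PySem.Int.bxor ((PySem.Int.band chk 0xFFFFF) <<< (10 : Nat)) v
    -- inner loop: for i in range(10): chk ^= GEN[i] if ((b >> i) & 1) else 0
    -- i ∈ range(10) is nonnegative, so Python's `b >> i` is `b >>> i.toNat`; GEN[i] is always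
    -- in range, so `(pyGet? …).getD 0` returns exactly Python's GEN[i].
    (PySem.List.pyRange 0 10 1).foldl (fun c i =>
      PySem.Int.bxor c
        (if PySem.Int.band (b >>> i.toNat) 1 ≠ 0 then (PySem.List.pyGet? pvGENA i).getD 0 else 0))
      chk1) 1

-- ===== PORT B =====
def pvGENB : List Int :=
  [0xE0E040, 0x1C1C080, 0x3838100, 0x7070200, 0xE0E0009,
   0x1C0C2412, 0x38086C24, 0x3090FC48, 0x21B1F890, 0x3F3F120]

-- _TABLE = [0]; for g in GEN: _TABLE += [t ^ g for t in _TABLE]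
def pvTABLE : List Int :=
  pvGENB.foldl (fun t g => t ++ t.map (fun x => PySem.Int.bxor x g)) [0]

def rs1024_polymod_py_alt (values : List Int) : Int :=
  values.foldl (fun chk v =>
    -- chk = ((chk & 0xFFFFF) << 10) ^ v ^ _TABLE[(chk >> 20) & 0x3FF]
    -- the index is in [0, 1024) = range of _TABLE, so `(pyGet? …).getD 0` is Python's _TABLE[…]
    PySem.Int.bxor
      (PySem.Int.bxor ((PySem.Int.band chk 0xFFFFF) <<< (10 : Nat)) v)
      ((PySem.List.pyGet? pvTABLE (PySem.Int.band (chk >>> (20 : Nat)) 0x3FF)).getD 0)) 1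

-- ===== PRECONDITION & SPEC =====
def Spec_rs1024_polymod_py (values : List Int) (out : Int) : Prop := out = rs1024_polymod_py_alt values
instance (values : List Int) (out : Int) : Decidable (Spec_rs1024_polymod_py values out) := by unfold Spec_rs1024_polymod_py; infer_instance

-- ===== CLAIM (what is proved, stated in full; the proofs are below) =====
def Claim_equal_rs1024_polymod_py : Prop := ∀ (values : List Int), Dom_rs1024_polymod_py values → Spec_rs1024_polymod_py values (rs1024_polymod_py values)

-- ===== LEMMAS AND PROOFS =====

-- PySem.Int.bxor acts componentwise on the two's-complement representation (sign, magnitude)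
theorem bxor_ofNat_negSucc (m n : Nat) :
    PySem.Int.bxor (↑m) (Int.negSucc n) = Int.negSucc (m ^^^ n) := by
  have h2 : ¬ (0:Int) ≤ Int.negSucc n := by omega
  have e2 : (-Int.negSucc n - 1).toNat = n := by omega
  have hm : ((↑m : Int)).toNat = m := by omega
  simp only [PySem.Int.bxor, if_pos (Int.natCast_nonneg m), if_neg h2, e2, hm]
  omega

theorem bxor_negSucc_ofNat (m n : Nat) :
    PySem.Int.bxor (Int.negSucc m) (↑n) = Int.negSucc (m ^^^ n) := by
  have h1 : ¬ (0:Int) ≤ Int.negSucc m := by omega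
  have e1 : (-Int.negSucc m - 1).toNat = m := by omega
  have hn : ((↑n : Int)).toNat = n := by omega
  simp only [PySem.Int.bxor, if_pos (Int.natCast_nonneg n), if_neg h1, e1, hn]
  omega

theorem bxor_negSucc_negSucc (m n : Nat) :
    PySem.Int.bxor (Int.negSucc m) (Int.negSucc n) = ((↑(m ^^^ n)) : Int) := by
  have h1 : ¬ (0:Int) ≤ Int.negSucc m := by omega
  have h2 : ¬ (0:Int) ≤ Int.negSucc n := by omega
  have e1 : (-Int.negSucc m - 1).toNat = m := by omega
  have e2 : (-Int.negSucc n - 1).toNat = n := by omega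
  simp only [PySem.Int.bxor, if_neg h1, if_neg h2, e1, e2]

theorem bxor_assoc (a b c : Int) :
    PySem.Int.bxor (PySem.Int.bxor a b) c = PySem.Int.bxor a (PySem.Int.bxor b c) := by
  cases a <;> cases b <;> cases c <;>
    simp [Int.ofNat_eq_natCast, bxor_ofNat_negSucc, bxor_negSucc_ofNat,
      bxor_negSucc_negSucc, Nat.xor_assoc]

theorem bxor_zero_left (a : Int) : PySem.Int.bxor 0 a = a := by
  rw [PySem.Int.bxor_comm]; exact PySem.Int.bxor_zero a

theorem nat_testBit_mod (n i : Nat) : n.testBit i = ((n >>> i) % 2 != 0) := by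
  rw [Nat.testBit, Nat.land_comm, Nat.and_one_is_mod]

-- the truthiness test of A's inner loop is the i-th two's-complement bit
theorem band_shift_one (b : Int) (i : Nat) :
    (PySem.Int.band (b >>> i) 1 ≠ 0) ↔ b.testBit i = true := by
  rw [PySem.Int.band_one]
  cases b with
  | ofNat n =>
      show (PySem.Int.mod (↑(n >>> i)) 2 ≠ 0) ↔ (n.testBit i = true)
      rw [nat_testBit_mod]
      generalize n >>> i = k
      have hm : PySem.Int.mod (↑k) 2 = ↑(k % 2) := by
        simp [PySem.Int.mod, Int.fmod_eq_emod]
      rw [hm]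
      rcases Nat.mod_two_eq_zero_or_one k with h | h <;> simp [h]
  | negSucc n =>
      show (PySem.Int.mod (Int.negSucc (n >>> i)) 2 ≠ 0) ↔ ((!(n.testBit i)) = true)
      rw [nat_testBit_mod]
      generalize n >>> i = k
      have he : Int.negSucc k = -(↑k : Int) - 1 := by omega
      have hm : PySem.Int.mod (Int.negSucc k) 2 = (-(↑k : Int) - 1) % 2 := by
        rw [he]; simp [PySem.Int.mod, Int.fmod_eq_emod]
      rw [hm]
      rcases Nat.mod_two_eq_zero_or_one k with h | h <;> simp [h] <;> omega

set_option maxRecDepth 8000 in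
set_option maxRecDepth 8000 in
theorem sub_xor_1023 : ∀ k, k < 1024 → 1023 - k = 1023 ^^^ k := by decide

theorem t1023 (i : Nat) (h : i < 10) : Nat.testBit 1023 i = true := by
  have : (1023:Nat) = 2^10 - 1 := by norm_num
  rw [this, Nat.testBit_two_pow_sub_one]; simpa

-- (b & 0x3FF) is the natural number with exactly the 10 low two's-complement bits of b
theorem band_mask (b : Int) :
    ∃ r : Nat, PySem.Int.band b 1023 = (↑r : Int) ∧ r < 1024 ∧
      ∀ i, i < 10 → r.testBit i = b.testBit i := by
  cases b with
  | ofNat n =>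
      refine ⟨n &&& 1023, ?_, ?_, ?_⟩
      · have := PySem.Int.band_natCast n 1023
        exact_mod_cast this
      · have := Nat.and_le_right (n := n) (m := 1023); omega
      · intro i hi
        rw [Nat.testBit_land, t1023 i hi]
        simp [Int.testBit]
  | negSucc n =>
      have h1 : ¬ (0:Int) ≤ Int.negSucc n := by omega
      have e1 : (-Int.negSucc n - 1).toNat = n := by omega
      have e2 : ((1023:Int)).toNat = 1023 := by omega
      refine ⟨1023 - (1023 &&& n), ?_, ?_, ?_⟩
      · show PySem.Int.band _ _ = _
        rw [PySem.Int.band]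
        rw [if_neg h1, if_pos (by norm_num : (0:Int) ≤ 1023), e1, e2]
      · have := Nat.and_le_left (n := 1023) (m := n); omega
      · intro i hi
        have hk : (1023 &&& n) < 1024 := by
          have := Nat.and_le_left (n := 1023) (m := n); omega
        rw [sub_xor_1023 _ hk, Nat.testBit_xor, Nat.testBit_land, t1023 i hi]
        simp [Int.testBit]

-- xor of a generator list selected by a bit predicate
def pvXorSel : List Int → (Nat → Bool) → Int
  | [], _ => 0
  | g :: gs, f => PySem.Int.bxor (if f 0 then g else 0) (pvXorSel gs (fun i => f (i + 1)))

theorem pvXorSel_congr (gs : List Int) (f f' : Nat → Bool)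
    (h : ∀ i, i < gs.length → f i = f' i) : pvXorSel gs f = pvXorSel gs f' := by
  induction gs generalizing f f' with
  | nil => rfl
  | cons g gs ih =>
      simp only [pvXorSel]
      rw [h 0 (by simp), ih _ _ (fun i hi => h (i+1) (by simpa using Nat.succ_lt_succ hi))]

theorem pvXorSel_append (gs : List Int) (g : Int) (f : Nat → Bool) :
    pvXorSel (gs ++ [g]) f = PySem.Int.bxor (pvXorSel gs f) (if f gs.length then g else 0) := by
  induction gs generalizing f with
  | nil => simp [pvXorSel, bxor_zero_left, PySem.Int.bxor_zero]
  | cons a gs ih =>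
      simp only [List.cons_append, pvXorSel, ih, List.length_cons, bxor_assoc]
      rfl

theorem pvTABLE_append (gs : List Int) (g : Int) :
    (gs ++ [g]).foldl (fun t g => t ++ t.map (fun x => PySem.Int.bxor x g)) [0]
      = (gs.foldl (fun t g => t ++ t.map (fun x => PySem.Int.bxor x g)) [0])
        ++ (gs.foldl (fun t g => t ++ t.map (fun x => PySem.Int.bxor x g)) [0]).map
             (fun x => PySem.Int.bxor x g) := by
  simp [List.foldl_append]

theorem pvTABLE_length (gens : List Int) :
    (gens.foldl (fun t g => t ++ t.map (fun x => PySem.Int.bxor x g)) [0]).length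
      = 2 ^ gens.length := by
  induction gens using List.reverseRecOn with
  | nil => rfl
  | append_singleton gs g ih => simp [ih]; ring

theorem testBit_high (n s : Nat) (hs : s < 2 ^ n) : (2 ^ n + s).testBit n = true := by
  have hd : (2 ^ n + s) / 2 ^ n = 1 := by
    rw [Nat.add_div_left _ (Nat.pow_pos (by norm_num)), Nat.div_eq_of_lt hs]
  rw [Nat.testBit, Nat.land_comm, Nat.and_one_is_mod, Nat.shiftRight_eq_div_pow, hd]
  rfl

theorem testBit_low (n s i : Nat) (_hs : s < 2 ^ n) (hi : i < n) :
    (2 ^ n + s).testBit i = s.testBit i := by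
  have h2 : (2 ^ n + s) / 2 ^ i = 2 ^ (n - i) + s / 2 ^ i := by
    have : 2 ^ n = 2 ^ (n - i) * 2 ^ i := by
      rw [← pow_add]; congr 1; omega
    rw [this, Nat.add_comm, Nat.add_mul_div_right _ _ (Nat.pow_pos (by norm_num)), Nat.add_comm]
  have h3 : 2 ^ (n - i) % 2 = 0 := by
    have : n - i = (n - i - 1) + 1 := by omega
    rw [this, pow_succ]; omega
  rw [Nat.testBit, Nat.testBit, Nat.land_comm 1, Nat.land_comm 1, Nat.and_one_is_mod,
    Nat.and_one_is_mod, Nat.shiftRight_eq_div_pow, Nat.shiftRight_eq_div_pow, h2]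
  simp [Nat.add_mod, h3]

-- the doubling-built table realizes exactly the bit-selected xors of the generators
theorem pvTABLE_getD (gens : List Int) : ∀ r : Nat, r < 2 ^ gens.length →
    (gens.foldl (fun t g => t ++ t.map (fun x => PySem.Int.bxor x g)) [0]).getD r 0
      = pvXorSel gens (fun i => r.testBit i) := by
  induction gens using List.reverseRecOn with
  | nil =>
      intro r hr
      have hr0 : r = 0 := by simpa using hr
      subst hr0
      rfl
  | append_singleton gs g ih =>
      intro r hr
      rw [pvTABLE_append, pvXorSel_append]
      by_cases hlt : r < 2 ^ gs.length
      · rw [List.getD_append _ _ _ _ (by rw [pvTABLE_length]; exact hlt), ih r hlt,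
          Nat.testBit_lt_two_pow hlt]
        simp [PySem.Int.bxor_zero]
      · have hsplit : r = 2 ^ gs.length + (r - 2 ^ gs.length) := by omega
        set s := r - 2 ^ gs.length with hs_def
        have hslt : s < 2 ^ gs.length := by simp [List.length_append] at hr; omega
        have hlen : (gs.foldl (fun t g => t ++ t.map (fun x => PySem.Int.bxor x g)) [0]).length ≤ r := by
          rw [pvTABLE_length]; omega
        rw [List.getD_append_right _ _ _ _ hlen, pvTABLE_length]
        have hslen : s < (List.map (fun x => PySem.Int.bxor x g)
            (gs.foldl (fun t g => t ++ t.map (fun x => PySem.Int.bxor x g)) [0])).length := by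
          simp [pvTABLE_length]; exact hslt
        rw [← hs_def, List.getD_eq_getElem _ _ hslen, List.getElem_map]
        rw [← List.getD_eq_getElem _ 0 (by simpa [pvTABLE_length] using hslt), ih s hslt]
        rw [hsplit, testBit_high _ _ hslt]
        simp only [if_true]
        congr 1
        exact pvXorSel_congr _ _ _ (fun i hi => (testBit_low _ _ _ hslt hi).symm)

-- the two step functions agree on every state
set_option maxRecDepth 8000 in
theorem step_eq (chk v : Int) :
    (let b := chk >>> (20 : Nat)
     let chk1 := PySem.Int.bxor ((PySem.Int.band chk 0xFFFFF) <<< (10 : Nat)) v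
     (PySem.List.pyRange 0 10 1).foldl (fun c i =>
       PySem.Int.bxor c
         (if PySem.Int.band (b >>> i.toNat) 1 ≠ 0 then (PySem.List.pyGet? pvGENA i).getD 0 else 0))
       chk1)
    = PySem.Int.bxor
        (PySem.Int.bxor ((PySem.Int.band chk 0xFFFFF) <<< (10 : Nat)) v)
        ((PySem.List.pyGet? pvTABLE (PySem.Int.band (chk >>> (20 : Nat)) 0x3FF)).getD 0) := by
  obtain ⟨r, hr, hrlt, hbits⟩ := band_mask (chk >>> (20:Nat))
  have hTab : (PySem.List.pyGet? pvTABLE (PySem.Int.band (chk >>> (20:Nat)) 0x3FF)).getD 0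
      = pvXorSel pvGENB (fun i => (chk >>> (20:Nat)).testBit i) := by
    rw [show (0x3FF:Int) = 1023 from rfl, hr, PySem.List.pyGet?_natCast]
    have hlen : r < pvTABLE.length := by
      rw [show pvTABLE.length = 2 ^ pvGENB.length from pvTABLE_length pvGENB]
      simpa using hrlt
    rw [List.getElem?_eq_getElem hlen, Option.getD_some, ← List.getD_eq_getElem _ 0 hlen]
    unfold pvTABLE
    rw [pvTABLE_getD pvGENB r (by simpa using hrlt)]
    exact pvXorSel_congr _ _ _ (fun i hi => hbits i (by simpa [pvGENB] using hi))
  rw [hTab]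
  have hRange : PySem.List.pyRange 0 10 1 = [0,1,2,3,4,5,6,7,8,9] := by decide
  rw [hRange]
  simp only [List.foldl_cons, List.foldl_nil, pvXorSel, pvGENB]
  simp only [show ∀ b:Int, b >>> (((0:Int)).toNat : Int) = b >>> (0:Nat) from fun b => by cases b <;> rfl,
    show ∀ b:Int, b >>> (((1:Int)).toNat : Int) = b >>> (1:Nat) from fun b => by cases b <;> rfl,
    show ∀ b:Int, b >>> (((2:Int)).toNat : Int) = b >>> (2:Nat) from fun b => by cases b <;> rfl,
    show ∀ b:Int, b >>> (((3:Int)).toNat : Int) = b >>> (3:Nat) from fun b => by cases b <;> rfl,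
    show ∀ b:Int, b >>> (((4:Int)).toNat : Int) = b >>> (4:Nat) from fun b => by cases b <;> rfl,
    show ∀ b:Int, b >>> (((5:Int)).toNat : Int) = b >>> (5:Nat) from fun b => by cases b <;> rfl,
    show ∀ b:Int, b >>> (((6:Int)).toNat : Int) = b >>> (6:Nat) from fun b => by cases b <;> rfl,
    show ∀ b:Int, b >>> (((7:Int)).toNat : Int) = b >>> (7:Nat) from fun b => by cases b <;> rfl,
    show ∀ b:Int, b >>> (((8:Int)).toNat : Int) = b >>> (8:Nat) from fun b => by cases b <;> rfl,
    show ∀ b:Int, b >>> (((9:Int)).toNat : Int) = b >>> (9:Nat) from fun b => by cases b <;> rfl]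
  simp only [band_shift_one]
  norm_num [pvGENA, PySem.List.pyGet?, PySem.List.pyIdx?, bxor_assoc, PySem.Int.bxor_zero,
    List.getElem_cons_succ, List.getElem_cons_zero,
    show Int.toNat 2 = 2 from rfl,
    show Int.toNat 3 = 3 from rfl,
    show Int.toNat 4 = 4 from rfl,
    show Int.toNat 5 = 5 from rfl,
    show Int.toNat 6 = 6 from rfl,
    show Int.toNat 7 = 7 from rfl,
    show Int.toNat 8 = 8 from rfl,
    show Int.toNat 9 = 9 from rfl]

-- ===== VERDICT (by name: the statement is the Claim_ definition above) =====
theorem rs1024_polymod_py_spec : Claim_equal_rs1024_polymod_py := by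
  intro values _
  unfold Spec_rs1024_polymod_py rs1024_polymod_py rs1024_polymod_py_alt
  congr 1
  funext chk v
  exact step_eq chk v
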